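-- pv_equiv track=rewrite | github.com/polirritmico/codesignal_solutions | numberOfClans.py | is_friendly
-- ===== SOURCE A (Python) =====
-- def is_friendly(number: int, divisors: list[int]) -> bool:
--     prev_divisible = None
--     for divisor in divisors:
--         is_divisible = number % divisor == 0
--         prev_divisible = is_divisible if prev_divisible is None else prev_divisible
--         if is_divisible != prev_divisible:
--             return False
--     return True
-- ===== SOURCE B (Python) =====
-- def is_friendly(number: int, divisors: list[int]) -> bool:
--     hits = sum(1 for d in divisors if number % d == 0)
--     return hits == 0 or hits == len(divisors)
-- ===== Notes on version B (the rewrite author's own statement) =====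
-- stated objective: alternative
-- what changed: Replaces A's stateful loop (Optional prev flag, per-element boolean comparison with early exit) by counting the divisors that divide the number and deciding arithmetically: friendly iff the count is 0 or equals len(divisors).
-- outside the precondition, e.g. on is_friendly(3, [-4, 2, 1, 0, -3]): A returns False, B raises ZeroDivisionError
import Mathlib
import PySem

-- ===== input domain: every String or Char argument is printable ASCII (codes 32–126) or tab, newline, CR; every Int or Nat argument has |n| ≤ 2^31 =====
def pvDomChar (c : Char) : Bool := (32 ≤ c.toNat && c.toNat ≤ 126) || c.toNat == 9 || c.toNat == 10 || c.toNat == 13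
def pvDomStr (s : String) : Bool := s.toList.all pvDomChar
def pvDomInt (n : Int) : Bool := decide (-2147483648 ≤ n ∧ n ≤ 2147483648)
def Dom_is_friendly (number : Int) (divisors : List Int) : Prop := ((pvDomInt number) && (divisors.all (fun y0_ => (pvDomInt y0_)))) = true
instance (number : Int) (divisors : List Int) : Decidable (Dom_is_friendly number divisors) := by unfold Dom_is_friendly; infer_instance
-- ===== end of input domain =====

-- ===== PORT A =====
-- B replaces A's stateful flag-comparison loop by counting the divisors that divide
-- the number and deciding arithmetically from that count (objective: alternative).
def isFriendlyGo (number : Int) (prev : Option Bool) : List Int → Bool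
  | [] => true
  | d :: ds =>
    let isDiv := PySem.Int.mod number d == 0
    let prev' := match prev with
      | none => isDiv
      | some p => p
    if isDiv != prev' then false else isFriendlyGo number (some prev') ds

def is_friendly (number : Int) (divisors : List Int) : Bool :=
  isFriendlyGo number none divisors

-- ===== PORT B =====
def is_friendly_alt (number : Int) (divisors : List Int) : Bool :=
  let hits : Int := divisors.foldl (fun acc d => if PySem.Int.mod number d == 0 then acc + 1 else acc) 0
  decide (hits = 0 ∨ hits = (divisors.length : Int))

-- ===== PRECONDITION & SPEC =====
-- Pre_ excludes divisor lists containing 0: Python A raises ZeroDivisionError at the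
-- zero unless an earlier mismatch already returned False (an artefact of early exit),
-- and B raises ZeroDivisionError on every such list.
def Pre_is_friendly (number : Int) (divisors : List Int) : Prop := (0 : Int) ∉ divisors
instance (number : Int) (divisors : List Int) : Decidable (Pre_is_friendly number divisors) := by unfold Pre_is_friendly; infer_instance
def pvWitness_is_friendly : Int × List Int := (12, [2, 3, 4])

def Spec_is_friendly (number : Int) (divisors : List Int) (out : Bool) : Prop := out = is_friendly_alt number divisors
instance (number : Int) (divisors : List Int) (out : Bool) : Decidable (Spec_is_friendly number divisors out) := by unfold Spec_is_friendly; infer_instance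

-- ===== CLAIM (what is proved, stated in full; the proofs are below) =====
def Claim_equal_is_friendly : Prop := ∀ (number : Int) (divisors : List Int), Dom_is_friendly number divisors → Pre_is_friendly number divisors → Spec_is_friendly number divisors (is_friendly number divisors)

-- ===== LEMMAS AND PROOFS =====

-- A's loop with a locked-in flag b returns true iff every remaining outcome equals b.
theorem isFriendlyGo_some (number : Int) (b : Bool) (ds : List Int) :
    isFriendlyGo number (some b) ds = ds.all (fun d => (PySem.Int.mod number d == 0) == b) := by
  induction ds with
  | nil => simp [isFriendlyGo]
  | cons d ds ih =>
    simp only [isFriendlyGo, List.all_cons, ih]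
    cases h : (PySem.Int.mod number d == 0) <;> cases b <;> simp

-- B's counting fold equals the accumulator plus the count of satisfying elements.
theorem foldl_count (p : Int → Bool) (ds : List Int) (acc : Int) :
    ds.foldl (fun acc d => if p d then acc + 1 else acc) acc
      = acc + (ds.countP p : Int) := by
  induction ds generalizing acc with
  | nil => simp
  | cons d ds ih =>
    simp only [List.foldl_cons, List.countP_cons, ih]
    by_cases h : p d <;> simp [h] <;> push_cast <;> ring

-- ===== VERDICT (by name: the statement is the Claim_ definition above) =====
theorem is_friendly_spec : Claim_equal_is_friendly := by
  intro number divisors _ _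
  unfold Spec_is_friendly is_friendly is_friendly_alt
  set p : Int → Bool := fun d => PySem.Int.mod number d == 0 with hp
  cases divisors with
  | nil => simp [isFriendlyGo]
  | cons d ds =>
    have hgo : isFriendlyGo number none (d :: ds)
        = isFriendlyGo number (some (p d)) ds := by
      simp [isFriendlyGo, hp]
    rw [hgo, isFriendlyGo_some]
    show (ds.all fun x => p x == p d)
        = decide ((d :: ds).foldl (fun acc x => if p x then acc + 1 else acc) 0 = 0
            ∨ (d :: ds).foldl (fun acc x => if p x then acc + 1 else acc) 0 = ((d :: ds).length : Int))
    rw [foldl_count]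
    have hle : ds.countP p ≤ ds.length := List.countP_le_length
    cases hd : p d
    · -- first outcome false: all-equal ↔ count = 0, and count = length + 1 is impossible
      have hcnt : (d :: ds).countP p = ds.countP p := by simp [hd]
      rw [hcnt, List.length_cons, zero_add]
      have hA : ((ds.all fun x => p x == false) = true) ↔ ds.countP p = 0 := by
        simp [List.all_eq_true, List.countP_eq_zero]
      cases hall : (ds.all fun x => p x == false)
      · have hne : ds.countP p ≠ 0 := fun hc => by simpa using (hA.mpr hc).symm.trans hall
        symm; simp only [decide_eq_false_iff_not]
        push_cast
        omega
      · have hc : ds.countP p = 0 := hA.mp hall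
        simp [hc]
    · -- first outcome true: all-equal ↔ count = length
      have hcnt : (d :: ds).countP p = ds.countP p + 1 := by simp [hd]
      rw [hcnt, List.length_cons, zero_add]
      have hB : ((ds.all fun x => p x == true) = true) ↔ ds.countP p = ds.length := by
        simp [List.all_eq_true, List.countP_eq_length]
      cases hall : (ds.all fun x => p x == true)
      · have hne : ds.countP p ≠ ds.length := fun hc => by simpa using (hB.mpr hc).symm.trans hall
        symm; simp only [decide_eq_false_iff_not]
        push_cast
        omega
      · have hc : ds.countP p = ds.length := hB.mp hall
        simp [hc]
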